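-- pv_equiv track=rewrite | github.com/sandysanche-glitch/fira-fapi-kinetics | core_pipeline/segmentation/project_idmap_to_frame_jsons.py | rle_string_to_counts
-- ===== SOURCE A (Python) =====
-- from typing import Dict, List, Any, Tuple
--
-- def rle_string_to_counts(s: str) -> List[int]:
--     cnts: List[int] = []
--     p = 0
--     m = len(s)
--     while p < m:
--         x = 0
--         k = 0
--         more = 1
--         while more:
--             c = ord(s[p]) - 48
--             x |= (c & 0x1f) << (5 * k)
--             more = c & 0x20
--             p += 1
--             k += 1
--             if not more and (c & 0x10):
--                 x |= -1 << (5 * k)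
--         cnts.append(int(x))
--     # undo delta encoding
--     for i in range(2, len(cnts)):
--         cnts[i] += cnts[i - 2]
--     return cnts
-- ===== SOURCE B (Python) =====
-- from typing import List
--
--
-- def _prefix(xs: List[int]) -> List[int]:
--     acc = 0
--     res: List[int] = []
--     for v in xs:
--         acc += v
--         res.append(acc)
--     return res
--
--
-- def rle_string_to_counts(s: str) -> List[int]:
--     # phase 1: split the string into LEB128 chunks (a chunk ends at the first
--     # character whose continuation bit 0x20 is clear)
--     chunks: List[List[int]] = []
--     cur: List[int] = []
--     for ch in s:
--         c = ord(ch) - 48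
--         cur.append(c)
--         if not (c & 0x20):
--             chunks.append(cur)
--             cur = []
--     # phase 2: decode each chunk independently
--     raw: List[int] = []
--     for chunk in chunks:
--         x = 0
--         for i in range(len(chunk)):
--             x |= (chunk[i] & 0x1F) << (5 * i)
--         if chunk[-1] & 0x10:
--             x |= -1 << (5 * len(chunk))
--         raw.append(x)
--     # phase 3: undoing the delta coding = two independent prefix sums,
--     # one over the even positions and one over the odd positions
--     ev: List[int] = []
--     od: List[int] = []
--     for i, v in enumerate(raw):
--         (ev if i % 2 == 0 else od).append(v)
--     ev = _prefix(ev)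
--     od = _prefix(od)
--     out: List[int] = []
--     for i in range(len(raw)):
--         out.append(ev[i // 2] if i % 2 == 0 else od[i // 2])
--     return out
-- ===== Notes on version B (the rewrite author's own statement) =====
-- stated objective: alternative
-- what changed: Replaces A's fused index-driven decoder (nested while loops over a cursor, then an in-place cnts[i] += cnts[i-2] pass) by a three-phase pipeline: split the string into LEB128 chunks, decode each chunk independently, then undo the delta coding as two independent prefix sums over the even- and odd-indexed values interleaved back together.
import Mathlib
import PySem

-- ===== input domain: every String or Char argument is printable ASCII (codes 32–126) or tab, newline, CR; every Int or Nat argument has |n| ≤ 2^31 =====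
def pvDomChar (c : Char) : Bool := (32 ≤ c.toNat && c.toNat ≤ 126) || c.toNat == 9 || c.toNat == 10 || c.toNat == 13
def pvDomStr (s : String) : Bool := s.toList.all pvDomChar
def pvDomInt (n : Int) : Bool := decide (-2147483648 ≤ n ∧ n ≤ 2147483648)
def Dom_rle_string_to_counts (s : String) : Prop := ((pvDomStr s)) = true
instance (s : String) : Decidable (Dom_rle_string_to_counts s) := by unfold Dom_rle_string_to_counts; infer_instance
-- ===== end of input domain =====

-- B restructures A's decoder as a three-phase pipeline: chunk split, per-chunk decode,
-- and the delta-undo done as two parity prefix sums; return values agree on Pre_.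

-- ===== PORT A =====
-- inner `while more:` loop of A, structural recursion over the remaining characters
def pvInnerA : List Char → Int → Nat → Int × List Char
  | [], x, _ => (x, [])      -- Python raises IndexError here; such inputs are outside Pre_
  | ch :: rest, x, k =>
    let c : Int := (ch.toNat : Int) - 48
    let x' := PySem.Int.bor x ((PySem.Int.band c 31) <<< (5 * k))
    if PySem.Int.band c 32 ≠ 0 then pvInnerA rest x' (k + 1)
    else if PySem.Int.band c 16 ≠ 0 then (PySem.Int.bor x' (((-1) : Int) <<< (5 * (k + 1))), rest)
    else (x', rest)

theorem pvInnerA_len : ∀ (l : List Char) (x : Int) (k : Nat), (pvInnerA l x k).2.length ≤ l.length := by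
  intro l
  induction l with
  | nil => intro x k; simp [pvInnerA]
  | cons ch rest ih =>
    intro x k
    simp only [pvInnerA]
    split
    · exact le_trans (ih _ _) (Nat.le_succ _)
    · split <;> simp

-- outer `while p < m:` loop of A
def pvOuterA : List Char → List Int → List Int
  | [], acc => acc
  | ch :: rest, acc =>
    let r := pvInnerA (ch :: rest) 0 0
    pvOuterA r.2 (acc ++ [r.1])
termination_by l _ => l.length
decreasing_by
  have h : (pvInnerA (ch :: rest) 0 0).2.length ≤ rest.length := by
    simp only [pvInnerA]
    split
    · exact pvInnerA_len _ _ _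
    · split <;> simp
  simpa using Nat.lt_succ_of_le h

-- `for i in range(2, len(cnts)): cnts[i] += cnts[i-2]` as index recursion on the list
def pvDeltaA (l : List Int) (i : Nat) : List Int :=
  if h : i < l.length then
    pvDeltaA (l.set i (l.getD i 0 + l.getD (i - 2) 0)) (i + 1)
  else l
termination_by l.length - i
decreasing_by simpa using Nat.sub_succ_lt_self _ _ h

def rle_string_to_counts (s : String) : List Int :=
  pvDeltaA (pvOuterA s.toList []) 2

-- ===== PORT B =====
-- phase 1: split into LEB128 chunks (cur is the open chunk of c-values)
def pvSplitB : List Char → List Int → List (List Int)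
  | [], _ => []               -- a trailing incomplete chunk is dropped
  | ch :: rest, cur =>
    let c : Int := (ch.toNat : Int) - 48
    let cur' := cur ++ [c]
    if PySem.Int.band c 32 = 0 then cur' :: pvSplitB rest []
    else pvSplitB rest cur'

-- phase 2: the `for i in range(len(chunk))` OR-accumulation
def pvDecBody : List Int → Nat → Int → Int
  | [], _, x => x
  | c :: rest, i, x => pvDecBody rest (i + 1) (PySem.Int.bor x ((PySem.Int.band c 31) <<< (5 * i)))

def pvDecChunk (chunk : List Int) : Int :=
  let x := pvDecBody chunk 0 0
  match chunk.getLast? with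
  | some c =>
    if PySem.Int.band c 16 ≠ 0 then PySem.Int.bor x (((-1) : Int) <<< (5 * chunk.length)) else x
  | none => x

-- phase 3a: the enumerate loop splitting raw into even-/odd-indexed values
def pvParity : List Int → Bool → List Int × List Int
  | [], _ => ([], [])
  | v :: rest, even =>
    let p := pvParity rest (!even)
    if even then (v :: p.1, p.2) else (p.1, v :: p.2)

-- phase 3b: _prefix
def pvPrefix : List Int → Int → List Int
  | [], _ => []
  | v :: rest, acc => (acc + v) :: pvPrefix rest (acc + v)

-- phase 3c: the interleaving loop `for i in range(len(raw))`
def pvRebuild (n : Nat) (ev od : List Int) : List Int :=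
  (List.range n).map (fun i => if i % 2 = 0 then ev.getD (i / 2) 0 else od.getD (i / 2) 0)

def rle_string_to_counts_alt (s : String) : List Int :=
  let raw := (pvSplitB s.toList []).map pvDecChunk
  let p := pvParity raw true
  pvRebuild raw.length (pvPrefix p.1 0) (pvPrefix p.2 0)

-- ===== PRECONDITION & SPEC =====
-- Pre_ excludes exactly the inputs where A raises IndexError: a non-empty string whose
-- last character still has the LEB128 continuation bit 0x20 set (incomplete final chunk,
-- A reads past the end there; B drops the incomplete chunk and returns the counts so far).
def Pre_rle_string_to_counts (s : String) : Prop :=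
  PySem.Int.band (((s.toList.getLastD '0').toNat : Int) - 48) 32 = 0
instance (s : String) : Decidable (Pre_rle_string_to_counts s) := by
  unfold Pre_rle_string_to_counts; infer_instance

def pvWitness_rle_string_to_counts : String := "123"

def Spec_rle_string_to_counts (s : String) (out : List Int) : Prop := out = rle_string_to_counts_alt s
instance (s : String) (out : List Int) : Decidable (Spec_rle_string_to_counts s out) := by unfold Spec_rle_string_to_counts; infer_instance

-- ===== CLAIM (what is proved, stated in full; the proofs are below) =====
def Claim_equal_rle_string_to_counts : Prop := ∀ (s : String), Dom_rle_string_to_counts s → Pre_rle_string_to_counts s → Spec_rle_string_to_counts s (rle_string_to_counts s)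

-- ===== LEMMAS AND PROOFS =====

-- the intended value at index i: r[i] summed with r[i-2], r[i-4], …
def pvS (r : List Int) : Nat → Int
  | 0 => r.getD 0 0
  | 1 => r.getD 1 0
  | (n + 2) => r.getD (n + 2) 0 + pvS r n

theorem pvDecBody_append (c : Int) : ∀ (a : List Int) (i : Nat) (x : Int),
    pvDecBody (a ++ [c]) i x
      = PySem.Int.bor (pvDecBody a i x) ((PySem.Int.band c 31) <<< (5 * (i + a.length))) := by
  intro a
  induction a with
  | nil => intro i x; simp [pvDecBody]
  | cons c' a ih =>
    intro i x
    simp only [List.cons_append, pvDecBody, ih, List.length_cons]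
    ring_nf


theorem pvInner_split : ∀ (l : List Char) (cur : List Int),
    (∃ ch ∈ l, PySem.Int.band ((ch.toNat : Int) - 48) 32 = 0) →
    ∃ chunk rest, pvSplitB l cur = chunk :: pvSplitB rest []
      ∧ pvInnerA l (pvDecBody cur 0 0) cur.length = (pvDecChunk chunk, rest)
      ∧ rest.length < l.length
      ∧ (∀ c, rest.getLast? = some c → l.getLast? = some c) := by
  intro l
  induction l with
  | nil => intro cur hex; simp at hex
  | cons ch rest0 ih =>
    intro cur hex
    by_cases hc : PySem.Int.band ((ch.toNat : Int) - 48) 32 = 0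
    · refine ⟨cur ++ [(ch.toNat : Int) - 48], rest0, ?_, ?_, by simp, ?_⟩
      · simp [pvSplitB, hc]
      · simp only [pvInnerA, hc, ne_eq, not_true_eq_false, if_false]
        have hx : pvDecBody (cur ++ [(ch.toNat : Int) - 48]) 0 0
            = PySem.Int.bor (pvDecBody cur 0 0)
                ((PySem.Int.band ((ch.toNat : Int) - 48) 31) <<< (5 * cur.length)) := by
          simpa using pvDecBody_append ((ch.toNat : Int) - 48) cur 0 0
        simp only [pvDecChunk, List.getLast?_concat, hx, List.length_append, List.length_cons,
          List.length_nil, Nat.zero_add]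
        split <;> simp
      · intro c0 h0
        cases rest0 with
        | nil => simp at h0
        | cons b t => rw [List.getLast?_cons_cons]; exact h0
    · have hex' : ∃ ch' ∈ rest0, PySem.Int.band ((ch'.toNat : Int) - 48) 32 = 0 := by
        obtain ⟨ch', hm, hcl⟩ := hex
        rcases List.mem_cons.mp hm with h | h
        · exact absurd hcl (h ▸ hc)
        · exact ⟨ch', h, hcl⟩
      obtain ⟨chunk, rest, hsplit, hinner, hlen, hlast⟩ := ih (cur ++ [(ch.toNat : Int) - 48]) hex'
      refine ⟨chunk, rest, ?_, ?_, by simpa using Nat.lt_succ_of_lt hlen, ?_⟩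
      · simpa [pvSplitB, hc] using hsplit
      · have hx : pvDecBody (cur ++ [(ch.toNat : Int) - 48]) 0 0
            = PySem.Int.bor (pvDecBody cur 0 0)
                ((PySem.Int.band ((ch.toNat : Int) - 48) 31) <<< (5 * cur.length)) := by
          simpa using pvDecBody_append ((ch.toNat : Int) - 48) cur 0 0
        have hl : (cur ++ [(ch.toNat : Int) - 48]).length = cur.length + 1 := by simp
        rw [hx, hl] at hinner
        simpa [pvInnerA, hc] using hinner
      · intro c0 h0
        have h1 := hlast c0 h0
        cases rest0 with
        | nil => simp at h1
        | cons b t => rw [List.getLast?_cons_cons]; exact h1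

-- A's char loop produces exactly B's chunk decode, given the string ends a chunk
theorem pvOuter_eq : ∀ (n : Nat) (l : List Char), l.length ≤ n →
    (∀ c, l.getLast? = some c → PySem.Int.band ((c.toNat : Int) - 48) 32 = 0) →
    ∀ acc, pvOuterA l acc = acc ++ (pvSplitB l []).map pvDecChunk := by
  intro n
  induction n with
  | zero =>
    intro l hl _ acc
    have : l = [] := List.eq_nil_of_length_eq_zero (Nat.le_zero.mp hl)
    subst this
    simp [pvOuterA, pvSplitB]
  | succ n ih =>
    intro l hl hlast acc
    cases l with
    | nil => simp [pvOuterA, pvSplitB]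
    | cons ch rest0 =>
      have hex : ∃ ch' ∈ ch :: rest0, PySem.Int.band ((ch'.toNat : Int) - 48) 32 = 0 := by
        refine ⟨(ch :: rest0).getLast (by simp), List.getLast_mem _, ?_⟩
        exact hlast _ (List.getLast?_eq_some_getLast (by simp))
      obtain ⟨chunk, rest, hsplit, hinner, hlen, hl2⟩ := pvInner_split (ch :: rest0) [] hex
      have hinner' : pvInnerA (ch :: rest0) 0 0 = (pvDecChunk chunk, rest) := by
        simpa [pvDecBody] using hinner
      rw [pvOuterA, hinner']
      have hrest : pvOuterA rest (acc ++ [pvDecChunk chunk])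
          = (acc ++ [pvDecChunk chunk]) ++ (pvSplitB rest []).map pvDecChunk := by
        refine ih rest (by omega) ?_ _
        intro c hc
        exact hlast c (hl2 c hc)
      rw [hrest, hsplit]
      simp

-- A's in-place delta pass yields pvS at every index
theorem pvGetD_set (l : List Int) (i j : Nat) (v : Int) :
    (l.set i v).getD j 0 = if i = j ∧ i < l.length then v else l.getD j 0 := by
  simp only [List.getD_eq_getElem?_getD, List.getElem?_set]
  by_cases hij : i = j
  · subst hij
    by_cases hi : i < l.length
    · simp [hi]
    · have hn : l[i]? = none := List.getElem?_eq_none (by omega)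
      simp [hi, hn]
  · simp [hij]

theorem pvDelta_inv_aux : ∀ (n : Nat) (r : List Int) (m : Nat) (l : List Int),
    r.length - (m + 2) = n → l.length = r.length →
    (∀ j, j < m + 2 → l.getD j 0 = pvS r j) →
    (∀ j, m + 2 ≤ j → l.getD j 0 = r.getD j 0) →
    pvDeltaA l (m + 2) = (List.range r.length).map (pvS r) := by
  intro n
  induction n with
  | zero =>
    intro r m l hn hlen h1 _
    rw [pvDeltaA, dif_neg (by omega)]
    refine List.ext_getElem (by simpa using hlen) ?_
    intro j hj hj2
    have hjr : j < r.length := by simpa using hj2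
    have := h1 j (by omega)
    rw [List.getD_eq_getElem l 0 hj] at this
    simp [this]
  | succ n ih =>
    intro r m l hn hlen h1 h2
    have hm : m + 2 < l.length := by omega
    rw [pvDeltaA, dif_pos hm]
    have hval : l.getD (m + 2) 0 + l.getD (m + 2 - 2) 0 = pvS r (m + 2) := by
      have e1 : l.getD (m + 2) 0 = r.getD (m + 2) 0 := h2 _ le_rfl
      have e2 : l.getD (m + 2 - 2) 0 = pvS r m := by
        simpa using h1 m (by omega)
      rw [e1, e2, pvS]
    rw [show m + 2 + 1 = m + 1 + 2 from by omega]
    refine ih r (m + 1) (l.set (m + 2) (l.getD (m + 2) 0 + l.getD (m + 2 - 2) 0))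
      (by omega) (by simpa using hlen) ?_ ?_
    · intro j hj
      rw [pvGetD_set]
      by_cases hje : m + 2 = j
      · rw [if_pos ⟨hje, hm⟩, ← hje]
        exact hval
      · rw [if_neg (by tauto)]
        exact h1 j (by omega)
    · intro j hj
      rw [pvGetD_set, if_neg (by omega)]
      exact h2 j (by omega)

theorem pvDelta_inv : ∀ (r : List Int) (m : Nat) (l : List Int), l.length = r.length →
    (∀ j, j < m + 2 → l.getD j 0 = pvS r j) →
    (∀ j, m + 2 ≤ j → l.getD j 0 = r.getD j 0) →
    pvDeltaA l (m + 2) = (List.range r.length).map (pvS r) := by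
  intro r m l hlen h1 h2
  exact pvDelta_inv_aux (r.length - (m + 2)) r m l rfl hlen h1 h2

theorem pvParity_swap : ∀ (l : List Int),
    pvParity l false = ((pvParity l true).2, (pvParity l true).1) := by
  intro l
  induction l with
  | nil => simp [pvParity]
  | cons v rest ih => simp [pvParity, ih]


theorem pvParity_getD : ∀ (l : List Int) (j : Nat),
    (pvParity l true).1.getD j 0 = l.getD (2 * j) 0
      ∧ (pvParity l true).2.getD j 0 = l.getD (2 * j + 1) 0 := by
  intro l
  induction l with
  | nil => intro j; simp [pvParity]
  | cons v rest ih =>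
    intro j
    simp only [pvParity, pvParity_swap, Bool.not_true, if_true]
    constructor
    · cases j with
      | zero => simp
      | succ j =>
        have h := (ih j).2
        have h2 : 2 * (j + 1) = 2 * j + 1 + 1 := by omega
        simp only [List.getD_cons_succ, h, h2]
    · have h := (ih j).1
      simp only [List.getD_cons_succ, h]


theorem pvParity_len (l : List Int) :
    2 * (pvParity l true).1.length ≥ l.length ∧ 2 * (pvParity l true).2.length + 1 ≥ l.length := by
  induction l with
  | nil => simp [pvParity]
  | cons v rest ih =>
    simp only [pvParity, pvParity_swap, Bool.not_true, if_true, List.length_cons]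
    constructor <;> omega


theorem pvPrefix_getD : ∀ (xs : List Int) (acc : Int) (t : Nat), t < xs.length →
    (pvPrefix xs acc).getD t 0 = acc + ((xs.take (t + 1)).sum) := by
  intro xs
  induction xs with
  | nil => intro acc t h; simp at h
  | cons v rest ih =>
    intro acc t h
    cases t with
    | zero => simp [pvPrefix]
    | succ t =>
      simp only [List.length_cons] at h
      simp only [pvPrefix, List.getD_cons_succ, List.take_succ_cons, List.sum_cons,
        ih (acc + v) t (by omega)]
      ring


-- B's parity prefix sums yield pvS at every index
theorem pvSum_take_succ (xs : List Int) (t : Nat) (h : t < xs.length) :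
    (xs.take (t + 1)).sum = (xs.take t).sum + xs.getD t 0 := by
  rw [List.take_succ, List.sum_append]
  simp [List.getElem?_eq_getElem h, List.getD_eq_getElem xs 0 h, List.sum_cons]

theorem pvPrefix_S_even : ∀ (t : Nat) (r : List Int), 2 * t < r.length →
    (pvPrefix (pvParity r true).1 0).getD t 0 = pvS r (2 * t) := by
  intro t
  induction t with
  | zero =>
    intro r h
    have hE : 0 < (pvParity r true).1.length := by
      have := (pvParity_len r).1; omega
    rw [pvPrefix_getD _ _ _ hE, pvSum_take_succ _ _ hE]
    simpa [pvS] using (pvParity_getD r 0).1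
  | succ t ih =>
    intro r h
    have hE : t + 1 < (pvParity r true).1.length := by
      have := (pvParity_len r).1; omega
    rw [pvPrefix_getD _ _ _ hE, pvSum_take_succ _ _ (by omega)]
    have hprev : (pvPrefix (pvParity r true).1 0).getD t 0 = pvS r (2 * t) := ih r (by omega)
    rw [pvPrefix_getD _ _ _ (by omega)] at hprev
    have hget := (pvParity_getD r (t + 1)).1
    have h2 : 2 * (t + 1) = 2 * t + 2 := by omega
    rw [← add_assoc, hprev, hget, h2, pvS]
    ring

theorem pvPrefix_S_odd : ∀ (t : Nat) (r : List Int), 2 * t + 1 < r.length →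
    (pvPrefix (pvParity r true).2 0).getD t 0 = pvS r (2 * t + 1) := by
  intro t
  induction t with
  | zero =>
    intro r h
    have hO : 0 < (pvParity r true).2.length := by
      have := (pvParity_len r).2; omega
    rw [pvPrefix_getD _ _ _ hO, pvSum_take_succ _ _ hO]
    simpa [pvS] using (pvParity_getD r 0).2
  | succ t ih =>
    intro r h
    have hO : t + 1 < (pvParity r true).2.length := by
      have := (pvParity_len r).2; omega
    rw [pvPrefix_getD _ _ _ hO, pvSum_take_succ _ _ (by omega)]
    have hprev : (pvPrefix (pvParity r true).2 0).getD t 0 = pvS r (2 * t + 1) := ih r (by omega)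
    rw [pvPrefix_getD _ _ _ (by omega)] at hprev
    have hget := (pvParity_getD r (t + 1)).2
    have h2 : 2 * (t + 1) + 1 = (2 * t + 1) + 2 := by omega
    rw [← add_assoc, hprev, hget, h2, pvS]
    ring

theorem pvB_eq_S (r : List Int) (i : Nat) (hi : i < r.length) :
    (if i % 2 = 0 then (pvPrefix (pvParity r true).1 0).getD (i / 2) 0
     else (pvPrefix (pvParity r true).2 0).getD (i / 2) 0) = pvS r i := by
  by_cases hp : i % 2 = 0
  · rw [if_pos hp]
    have h2 : 2 * (i / 2) = i := by omega
    rw [pvPrefix_S_even (i / 2) r (by omega), h2]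
  · rw [if_neg hp]
    have h2 : 2 * (i / 2) + 1 = i := by omega
    rw [pvPrefix_S_odd (i / 2) r (by omega), h2]

-- ===== VERDICT (by name: the statement is the Claim_ definition above) =====
theorem rle_string_to_counts_spec : Claim_equal_rle_string_to_counts := by
  intro s _ hpre
  unfold Spec_rle_string_to_counts rle_string_to_counts rle_string_to_counts_alt
  have hlast : ∀ c, s.toList.getLast? = some c →
      PySem.Int.band ((c.toNat : Int) - 48) 32 = 0 := by
    intro c hc
    unfold Pre_rle_string_to_counts at hpre
    rw [List.getLastD_eq_getLast?, hc] at hpre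
    exact hpre
  have houter : pvOuterA s.toList [] = (pvSplitB s.toList []).map pvDecChunk := by
    simpa using pvOuter_eq s.toList.length s.toList le_rfl hlast []
  rw [houter]
  set raw := (pvSplitB s.toList []).map pvDecChunk with hraw
  have hA : pvDeltaA raw 2 = (List.range raw.length).map (pvS raw) := by
    refine pvDelta_inv raw 0 raw rfl ?_ (fun _ _ => rfl)
    intro j hj
    interval_cases j <;> simp [pvS]
  have hB : pvRebuild raw.length (pvPrefix (pvParity raw true).1 0) (pvPrefix (pvParity raw true).2 0)
      = (List.range raw.length).map (pvS raw) := by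
    unfold pvRebuild
    refine List.map_congr_left ?_
    intro i hi
    exact pvB_eq_S raw i (List.mem_range.mp hi)
  rw [hA, hB]
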